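-- pv_equiv track=rewrite | github.com/lotusluminous21-del/paintshop_template | functions/sync/products.py | _match_image_url
-- ===== SOURCE A (Python) =====
-- def _match_image_url(source_url: str, url_to_id_map: dict):
--     """
--     Matches a source image URL to a Shopify image ID.
--     Shopify CDN may transform URLs, so we use flexible matching:
--     - First try exact match
--     - Then try substring containment
--     - Then try matching the filename portion
--     """
--     # Exact match
--     if source_url in url_to_id_map:
--         return url_to_id_map[source_url]
--
--     # Substring containment
--     for shopify_url, img_id in url_to_id_map.items():
--         if source_url in shopify_url or shopify_url in source_url:
--             return img_id
--
--     # Filename match (last path segment, stripping query params)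
--     source_filename = source_url.split("/")[-1].split("?")[0]
--     for shopify_url, img_id in url_to_id_map.items():
--         shopify_filename = shopify_url.split("/")[-1].split("?")[0]
--         if source_filename and source_filename == shopify_filename:
--             return img_id
--
--     return None
-- ===== SOURCE B (Python) =====
-- def _match_image_url(source_url: str, url_to_id_map: dict):
--     """Single pass: priority 0 = exact (early return), 1 = containment,
--     2 = filename match; lowest priority wins, earliest entry breaks ties."""
--     source_filename = source_url.split("/")[-1].split("?")[0]
--     best_prio = 3
--     best_id = None
--     for shopify_url, img_id in url_to_id_map.items():
--         if shopify_url == source_url: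
--             return img_id
--         if source_url in shopify_url or shopify_url in source_url:
--             prio = 1
--         elif source_filename and source_filename == shopify_url.split("/")[-1].split("?")[0]:
--             prio = 2
--         else:
--             continue
--         if prio < best_prio:
--             best_prio = prio
--             best_id = img_id
--     return best_id
-- ===== Notes on version B (the rewrite author's own statement) =====
-- stated objective: alternative
-- what changed: Replaces A's three sequential scans (hash exact lookup, containment pass, filename pass) by one single pass that keeps the best (lowest-priority, earliest) match and early-exits on an exact match; the source filename is computed once up front (trades A's O(1) hash exact-match for a uniform scan).
import Mathlib
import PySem

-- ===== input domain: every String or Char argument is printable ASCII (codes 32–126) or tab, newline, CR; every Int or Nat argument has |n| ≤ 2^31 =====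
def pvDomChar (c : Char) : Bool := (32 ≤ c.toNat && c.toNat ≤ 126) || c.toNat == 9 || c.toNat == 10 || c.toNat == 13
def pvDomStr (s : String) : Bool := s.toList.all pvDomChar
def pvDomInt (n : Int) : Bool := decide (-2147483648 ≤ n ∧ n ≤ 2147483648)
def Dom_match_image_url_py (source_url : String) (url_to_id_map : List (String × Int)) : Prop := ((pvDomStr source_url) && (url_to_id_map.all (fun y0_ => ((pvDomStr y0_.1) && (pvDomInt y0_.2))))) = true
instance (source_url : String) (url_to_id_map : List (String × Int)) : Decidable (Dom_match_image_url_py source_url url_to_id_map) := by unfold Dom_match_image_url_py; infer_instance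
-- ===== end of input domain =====

-- B replaces A's three sequential scans by one single pass keeping the best-priority earliest
-- match (alternative decomposition, same asymptotic cost); return-value equivalence only.

-- ===== PORT A =====
-- url.split("/")[-1].split("?")[0]  (shared literal sub-expression of both Pythons)
def pvFname (s : String) : String :=
  PySem.List.pyGetD (((PySem.Str.split? (PySem.List.pyGetD ((PySem.Str.split? s "/").getD []) (-1) "") "?")).getD []) 0 ""

-- 'source_url in url_to_id_map' + 'url_to_id_map[source_url]' : first entry whose key equals it
def pvDictLookup (src : String) : List (String × Int) → Option Int
  | [] => none
  | (k, v) :: rest => if k = src then some v else pvDictLookup src rest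

-- A's first loop: substring containment
def pvContainScan (src : String) : List (String × Int) → Option Int
  | [] => none
  | (k, v) :: rest =>
    if PySem.Str.isIn src k || PySem.Str.isIn k src then some v else pvContainScan src rest

-- A's second loop: filename match
def pvFnameScan (fn : String) : List (String × Int) → Option Int
  | [] => none
  | (k, v) :: rest =>
    if fn ≠ "" ∧ fn = pvFname k then some v else pvFnameScan fn rest

def match_image_url_py (source_url : String) (url_to_id_map : List (String × Int)) : Option Int :=
  match pvDictLookup source_url url_to_id_map with
  | some v => some v
  | none =>
    match pvContainScan source_url url_to_id_map with
    | some v => some v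
    | none => pvFnameScan (pvFname source_url) url_to_id_map

-- ===== PORT B =====
-- Source B's single loop: best_prio / best_id accumulator, early return on an exact match
def pvBestLoop (src fn : String) : List (String × Int) → Int → Option Int → Option Int
  | [], _, bestId => bestId
  | (k, v) :: rest, bestPrio, bestId =>
    if k = src then some v
    else if PySem.Str.isIn src k || PySem.Str.isIn k src then
      (if 1 < bestPrio then pvBestLoop src fn rest 1 (some v)
       else pvBestLoop src fn rest bestPrio bestId)
    else if fn ≠ "" ∧ fn = pvFname k then
      (if 2 < bestPrio then pvBestLoop src fn rest 2 (some v)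
       else pvBestLoop src fn rest bestPrio bestId)
    else pvBestLoop src fn rest bestPrio bestId

def match_image_url_py_alt (source_url : String) (url_to_id_map : List (String × Int)) : Option Int :=
  pvBestLoop source_url (pvFname source_url) url_to_id_map 3 none

-- ===== PRECONDITION & SPEC =====
def Spec_match_image_url_py (source_url : String) (url_to_id_map : List (String × Int)) (out : Option Int) : Prop := out = match_image_url_py_alt source_url url_to_id_map
instance (source_url : String) (url_to_id_map : List (String × Int)) (out : Option Int) : Decidable (Spec_match_image_url_py source_url url_to_id_map out) := by unfold Spec_match_image_url_py; infer_instance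

-- ===== CLAIM (what is proved, stated in full; the proofs are below) =====
def Claim_equal_match_image_url_py : Prop := ∀ (source_url : String) (url_to_id_map : List (String × Int)), Dom_match_image_url_py source_url url_to_id_map → Spec_match_image_url_py source_url url_to_id_map (match_image_url_py source_url url_to_id_map)

-- ===== LEMMAS AND PROOFS =====

-- What B's accumulator denotes: A's remaining phases, cut off at the priority already held.
def pvRhs (src fn : String) (xs : List (String × Int)) (bestPrio : Int) (bestId : Option Int) : Option Int :=
  match pvDictLookup src xs with
  | some v => some v
  | none =>
    if bestPrio = 1 then bestId
    else
      match pvContainScan src xs with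
      | some v => some v
      | none =>
        if bestPrio = 2 then bestId
        else pvFnameScan fn xs

lemma pvBestLoop_eq_pvRhs (src fn : String) :
    ∀ (xs : List (String × Int)) (bp : Int) (bid : Option Int),
      (bp = 1 ∨ bp = 2 ∨ (bp = 3 ∧ bid = none)) →
      pvBestLoop src fn xs bp bid = pvRhs src fn xs bp bid := by
  intro xs
  induction xs with
  | nil =>
    intro bp bid h
    rcases h with h | h | ⟨h, h'⟩ <;> subst h <;>
      simp_all [pvBestLoop, pvRhs, pvDictLookup, pvContainScan, pvFnameScan]
  | cons hd rest ih =>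
    intro bp bid h
    obtain ⟨k, v⟩ := hd
    by_cases hk : k = src
    · simp [pvBestLoop, pvRhs, pvDictLookup, hk]
    · by_cases hc : PySem.Chars.isIn src.toList k.toList = true ∨ PySem.Chars.isIn k.toList src.toList = true
      · rcases h with h | h | ⟨h, h'⟩ <;> subst h
        · simp [pvBestLoop, pvRhs, pvDictLookup, pvContainScan, hk, hc, ih 1 bid (Or.inl rfl)]
        · simp [pvBestLoop, pvRhs, pvDictLookup, pvContainScan, hk, hc, ih 1 (some v) (Or.inl rfl)]
        · subst h'
          simp [pvBestLoop, pvRhs, pvDictLookup, pvContainScan, hk, hc, ih 1 (some v) (Or.inl rfl)]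
      · by_cases hf : ¬fn = "" ∧ fn = pvFname k
        · have hfi : (¬fn = "" ∧ fn = pvFname k) = True := eq_true hf
          rcases h with h | h | ⟨h, h'⟩ <;> subst h
          · simp [pvBestLoop, pvRhs, pvDictLookup, pvContainScan, pvFnameScan, hk, hc, hfi,
                  ih 1 bid (Or.inl rfl)]
          · simp [pvBestLoop, pvRhs, pvDictLookup, pvContainScan, pvFnameScan, hk, hc, hfi,
                  ih 2 bid (Or.inr (Or.inl rfl))]
          · subst h'
            simp [pvBestLoop, pvRhs, pvDictLookup, pvContainScan, pvFnameScan, hk, hc, hfi,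
                  ih 2 (some v) (Or.inr (Or.inl rfl))]
        · have hfi : (¬fn = "" ∧ fn = pvFname k) = False := eq_false hf
          rcases h with h | h | ⟨h, h'⟩ <;> subst h
          · simp [pvBestLoop, pvRhs, pvDictLookup, pvContainScan, pvFnameScan, hk, hc, hfi,
                  ih 1 bid (Or.inl rfl)]
          · simp [pvBestLoop, pvRhs, pvDictLookup, pvContainScan, pvFnameScan, hk, hc, hfi,
                  ih 2 bid (Or.inr (Or.inl rfl))]
          · subst h'
            simp [pvBestLoop, pvRhs, pvDictLookup, pvContainScan, pvFnameScan, hk, hc, hfi,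
                  ih 3 none (Or.inr (Or.inr ⟨rfl, rfl⟩))]

-- ===== VERDICT (by name: the statement is the Claim_ definition above) =====
theorem match_image_url_py_spec : Claim_equal_match_image_url_py := by
  intro src m _
  unfold Spec_match_image_url_py match_image_url_py match_image_url_py_alt
  rw [pvBestLoop_eq_pvRhs src (pvFname src) m 3 none (Or.inr (Or.inr ⟨rfl, rfl⟩))]
  unfold pvRhs
  rcases pvDictLookup src m with _ | v <;> rcases pvContainScan src m with _ | w <;> simp
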